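-- pv_equiv track=rewrite | github.com/MrBrantCode/unitest_baseline | mut_generate/mist_train_taco/taco_16425/solution.py | count_good_plans
-- ===== SOURCE A (Python) =====
-- def count_good_plans(n, m, b, mod, bugs_per_line):
--     # Initialize the dp array
--     dp = [[[0 for _ in range(b + 1)] for _ in range(m + 1)] for _ in range(2)]
--
--     # Base case: when no lines are written, there is exactly one way to achieve 0 bugs
--     for i in range(n + 1):
--         for x in range(b + 1):
--             dp[i % 2][0][x] = 1
--
--     # Fill the dp array
--     for i in range(1, n + 1):
--         for j in range(1, m + 1):
--             for x in range(b + 1):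
--                 if bugs_per_line[i - 1] <= x:
--                     dp[i % 2][j][x] = (dp[(i - 1) % 2][j][x] + dp[i % 2][j - 1][x - bugs_per_line[i - 1]]) % mod
--                 else:
--                     dp[i % 2][j][x] = dp[(i - 1) % 2][j][x] % mod
--
--     # The answer is the number of ways to write m lines with at most b bugs
--     return dp[n % 2][m][b]
-- ===== SOURCE B (Python) =====
-- def count_good_plans(n, m, b, mod, bugs_per_line):
--     # Top-down memoized recursion over (programmers remaining, lines remaining, bug budget).
--     memo = {}
--
--     def f(i, j, x):
--         if j == 0:
--             return 1          # one way to write zero lines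
--         if i <= 0:
--             return 0          # no programmers left, but lines remain
--         key = (i, j, x)
--         if key in memo:
--             return memo[key]
--         cost = bugs_per_line[i - 1]
--         res = f(i - 1, j, x)
--         if cost <= x:
--             res += f(i, j - 1, x - cost)
--         res %= mod
--         memo[key] = res
--         return res
--
--     return f(n, m, b)
-- ===== Notes on version B (the rewrite author's own statement) =====
-- stated objective: alternative
-- what changed: Replaced the bottom-up rolling 3-D table with a top-down memoized recursion f(i, j, x) over (programmers remaining, lines remaining, bug budget).
-- intended difference: For n < 0 and m = 0 A returns 0 because its base-case loop never runs and the uninitialised table is read, but there is exactly one plan that writes zero lines, so B returns 1, the intended value. — e.g. on count_good_plans(-1, 0, 0, 1, []): A returns 0, B returns 1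
import Mathlib
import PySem

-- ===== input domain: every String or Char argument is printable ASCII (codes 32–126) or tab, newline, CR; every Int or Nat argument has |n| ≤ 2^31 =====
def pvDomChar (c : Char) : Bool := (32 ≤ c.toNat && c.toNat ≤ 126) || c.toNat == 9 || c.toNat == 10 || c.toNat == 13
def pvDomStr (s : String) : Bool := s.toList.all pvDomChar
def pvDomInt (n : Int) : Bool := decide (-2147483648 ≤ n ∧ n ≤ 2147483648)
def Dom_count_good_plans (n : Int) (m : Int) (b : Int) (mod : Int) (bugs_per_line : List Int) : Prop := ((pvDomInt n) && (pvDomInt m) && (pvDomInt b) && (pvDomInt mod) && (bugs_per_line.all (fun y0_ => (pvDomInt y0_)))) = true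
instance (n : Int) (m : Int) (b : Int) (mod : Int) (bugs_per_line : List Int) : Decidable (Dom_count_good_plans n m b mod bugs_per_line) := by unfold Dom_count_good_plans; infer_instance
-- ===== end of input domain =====

-- B replaces A's bottom-up rolling 3-D table by a top-down recursion over
-- (programmers remaining, lines remaining, bug budget) — an alternative decomposition
-- of the same recurrence (Source B memoizes it; memoization does not change the value).
-- Equivalence is about the return value; on n < 0 with m = 0 (D_ below) B intentionally
-- returns 1 where A returns 0 from its never-initialised table.

-- ===== PORT A =====
-- Array helpers for the dp table (list of lists of lists, as in the Python).
-- Reads/writes use .toNat-clamped indexing: under Pre_ every index Python touches is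
-- nonnegative and in range, where this is exact.
def pvGet3 (dp : List (List (List Int))) (a b c : Int) : Int :=
  ((dp.getD a.toNat []).getD b.toNat []).getD c.toNat 0

def pvSet3 (dp : List (List (List Int))) (a b c : Int) (v : Int) : List (List (List Int)) :=
  dp.modify a.toNat (fun p => p.modify b.toNat (fun q => q.set c.toNat v))

def count_good_plans (n : Int) (m : Int) (b : Int) (mod : Int) (bugs_per_line : List Int) : Int :=
  let dp0 : List (List (List Int)) :=
    List.replicate 2 (List.replicate (m+1).toNat (List.replicate (b+1).toNat (0 : Int)))
  -- base case loops: for i in range(n+1): for x in range(b+1): dp[i%2][0][x] = 1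
  let dp1 := (PySem.List.pyRange 0 (n+1) 1).foldl (fun dp i =>
      (PySem.List.pyRange 0 (b+1) 1).foldl (fun dp x =>
        pvSet3 dp (PySem.Int.mod i 2) 0 x 1) dp) dp0
  -- fill loops
  let dp2 := (PySem.List.pyRange 1 (n+1) 1).foldl (fun dp i =>
      (PySem.List.pyRange 1 (m+1) 1).foldl (fun dp j =>
        (PySem.List.pyRange 0 (b+1) 1).foldl (fun dp x =>
          let c := PySem.List.pyGetD bugs_per_line (i-1) 0
          if c ≤ x then
            pvSet3 dp (PySem.Int.mod i 2) j x
              (PySem.Int.mod (pvGet3 dp (PySem.Int.mod (i-1) 2) j x +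
                pvGet3 dp (PySem.Int.mod i 2) (j-1) (x - c)) mod)
          else
            pvSet3 dp (PySem.Int.mod i 2) j x
              (PySem.Int.mod (pvGet3 dp (PySem.Int.mod (i-1) 2) j x) mod)) dp) dp) dp1
  pvGet3 dp2 (PySem.Int.mod n 2) m b

-- ===== PORT B =====
-- f(i, j, x) of Source B on the Nat images of i and j ('i <= 0' in Source B is i = 0 here, matched
-- by .toNat at the call site); the recursion on i is curried out (pvAltRow is f for a fixed
-- programmer i+1, with prev = f(i, ., .)) so that both recursions are structural, with the
-- same case order and the same intermediate values.  Source B's memo table only caches values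
-- of this same recursion, so the unmemoized recursion computes the identical result.
def pvAltRow (mod : Int) (prev : Nat → Int → Int) (c : Int) : Nat → Int → Int
  | 0, _ => 1
  | j+1, x =>
    let r := prev (j+1) x
    let r := if c ≤ x then r + pvAltRow mod prev c j (x - c) else r
    PySem.Int.mod r mod

def pvAltF (bugs : List Int) (mod : Int) : Nat → Nat → Int → Int
  | 0, 0, _ => 1
  | 0, _+1, _ => 0
  | i+1, j, x => pvAltRow mod (pvAltF bugs mod i) (PySem.List.pyGetD bugs (Int.ofNat i) 0) j x

def count_good_plans_alt (n : Int) (m : Int) (b : Int) (mod : Int) (bugs_per_line : List Int) : Int :=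
  pvAltF bugs_per_line mod n.toNat m.toNat b

-- ===== PRECONDITION & SPEC =====
-- Pre_ excludes exactly the inputs where the Python A raises: m < 0 or b < 0 (IndexError
-- reading the degenerate table), and — when the fill loops run, i.e. n ≥ 1 and m ≥ 1 —
-- mod = 0 (ZeroDivisionError), a bugs list shorter than n (IndexError), or a negative
-- cost among the first n entries (IndexError at x - cost > b).
def Pre_count_good_plans (n : Int) (m : Int) (b : Int) (mod : Int) (bugs_per_line : List Int) : Prop :=
  0 ≤ m ∧ 0 ≤ b ∧
    (1 ≤ n → 1 ≤ m →
      mod ≠ 0 ∧ n ≤ bugs_per_line.length ∧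
        ∀ i : Int, 0 ≤ i → i < n → 0 ≤ PySem.List.pyGetD bugs_per_line i 0)
instance (n : Int) (m : Int) (b : Int) (mod : Int) (bugs_per_line : List Int) : Decidable (Pre_count_good_plans n m b mod bugs_per_line) := by
  unfold Pre_count_good_plans
  have : ∀ N : Int, Decidable (∀ i : Int, 0 ≤ i → i < N → 0 ≤ PySem.List.pyGetD bugs_per_line i 0) := by
    intro N
    refine decidable_of_iff (∀ k ∈ List.range N.toNat, 0 ≤ PySem.List.pyGetD bugs_per_line (k : Int) 0) ⟨?_, ?_⟩
    · intro h i h0 hN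
      have := h i.toNat (by simp [List.mem_range]; omega)
      simpa [Int.toNat_of_nonneg h0] using this
    · intro h k hk
      exact h _ (by positivity) (by simp [List.mem_range] at hk; omega)
  exact instDecidableAnd

def pvWitness_count_good_plans : Int × Int × Int × Int × List Int := (2, 2, 3, 7, [1, 2])

-- For n < 0 and m = 0 A returns 0 because its base-case loop never runs and the
-- uninitialised table is read, but there is exactly one plan that writes zero lines,
-- so B returns 1, the intended value.
def D_count_good_plans (n : Int) (m : Int) (b : Int) (mod : Int) (bugs_per_line : List Int) : Prop :=
  n < 0 ∧ m = 0
instance (n : Int) (m : Int) (b : Int) (mod : Int) (bugs_per_line : List Int) : Decidable (D_count_good_plans n m b mod bugs_per_line) := by unfold D_count_good_plans; infer_instance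

def Spec_count_good_plans (n : Int) (m : Int) (b : Int) (mod : Int) (bugs_per_line : List Int) (out : Int) : Prop := ¬ D_count_good_plans n m b mod bugs_per_line → out = count_good_plans_alt n m b mod bugs_per_line
instance (n : Int) (m : Int) (b : Int) (mod : Int) (bugs_per_line : List Int) (out : Int) : Decidable (Spec_count_good_plans n m b mod bugs_per_line out) := by unfold Spec_count_good_plans; infer_instance

def pvDiffWitness_count_good_plans : Int × Int × Int × Int × List Int := (-1, 0, 0, 1, [])
def pvDiffWitnessOut_count_good_plans : Int × Int := (0, 1)

-- ===== CLAIM (what is proved, stated in full; the proofs are below) =====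
def Claim_unchanged_count_good_plans : Prop := ∀ (n : Int) (m : Int) (b : Int) (mod : Int) (bugs_per_line : List Int), Dom_count_good_plans n m b mod bugs_per_line → Pre_count_good_plans n m b mod bugs_per_line → Spec_count_good_plans n m b mod bugs_per_line (count_good_plans n m b mod bugs_per_line)
def Claim_changed_count_good_plans : Prop := Dom_count_good_plans (pvDiffWitness_count_good_plans.1) (pvDiffWitness_count_good_plans.2.1) (pvDiffWitness_count_good_plans.2.2.1) (pvDiffWitness_count_good_plans.2.2.2.1) (pvDiffWitness_count_good_plans.2.2.2.2) ∧ Pre_count_good_plans (pvDiffWitness_count_good_plans.1) (pvDiffWitness_count_good_plans.2.1) (pvDiffWitness_count_good_plans.2.2.1) (pvDiffWitness_count_good_plans.2.2.2.1) (pvDiffWitness_count_good_plans.2.2.2.2) ∧ D_count_good_plans (pvDiffWitness_count_good_plans.1) (pvDiffWitness_count_good_plans.2.1) (pvDiffWitness_count_good_plans.2.2.1) (pvDiffWitness_count_good_plans.2.2.2.1) (pvDiffWitness_count_good_plans.2.2.2.2) ∧ count_good_plans (pvDiffWitness_count_good_plans.1) (pvDiffWitness_count_good_plans.2.1) (pvDiffWitness_count_good_plans.2.2.1)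 (pvDiffWitness_count_good_plans.2.2.2.1) (pvDiffWitness_count_good_plans.2.2.2.2) = pvDiffWitnessOut_count_good_plans.1 ∧ count_good_plans_alt (pvDiffWitness_count_good_plans.1) (pvDiffWitness_count_good_plans.2.1) (pvDiffWitness_count_good_plans.2.2.1) (pvDiffWitness_count_good_plans.2.2.2.1) (pvDiffWitness_count_good_plans.2.2.2.2) = pvDiffWitnessOut_count_good_plans.2 ∧ pvDiffWitnessOut_count_good_plans.1 ≠ pvDiffWitnessOut_count_good_plans.2
def Claim_exact_count_good_plans : Prop := ∀ (n : Int) (m : Int) (b : Int) (mod : Int) (bugs_per_line : List Int), Dom_count_good_plans n m b mod bugs_per_line → Pre_count_good_plans n m b mod bugs_per_line → D_count_good_plans n m b mod bugs_per_line → count_good_plans n m b mod bugs_per_line ≠ count_good_plans_alt n m b mod bugs_per_line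

-- ===== LEMMAS AND PROOFS =====

-- A functional mirror of A's dp table (an update function over the index triple), used
-- only by the proofs: the fold lemmas below characterise it, and pvBridge relates it to
-- the list-based port.
def pvUpd (dp : Int → Int → Int → Int) (a b c v : Int) : Int → Int → Int → Int :=
  fun a' b' c' => if a' = a ∧ b' = b ∧ c' = c then v else dp a' b' c'

def pvAfun (n : Int) (m : Int) (b : Int) (mod : Int) (bugs_per_line : List Int) : Int :=
  let dp0 : Int → Int → Int → Int := fun _ _ _ => 0
  let dp1 := (PySem.List.pyRange 0 (n+1) 1).foldl (fun dp i =>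
      (PySem.List.pyRange 0 (b+1) 1).foldl (fun dp x =>
        pvUpd dp (PySem.Int.mod i 2) 0 x 1) dp) dp0
  let dp2 := (PySem.List.pyRange 1 (n+1) 1).foldl (fun dp i =>
      (PySem.List.pyRange 1 (m+1) 1).foldl (fun dp j =>
        (PySem.List.pyRange 0 (b+1) 1).foldl (fun dp x =>
          let c := PySem.List.pyGetD bugs_per_line (i-1) 0
          if c ≤ x then
            pvUpd dp (PySem.Int.mod i 2) j x
              (PySem.Int.mod (dp (PySem.Int.mod (i-1) 2) j x + dp (PySem.Int.mod i 2) (j-1) (x - c)) mod)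
          else
            pvUpd dp (PySem.Int.mod i 2) j x (PySem.Int.mod (dp (PySem.Int.mod (i-1) 2) j x) mod)) dp) dp) dp1
  dp2 (PySem.Int.mod n 2) m b

-- shape of the dp table and the simulation relation between the two representations

def pvShape (M B : Nat) (dp : List (List (List Int))) : Prop :=
  dp.length = 2 ∧ ∀ p ∈ dp, p.length = M ∧ ∀ q ∈ p, q.length = B

def pvRel (M B : Nat) (dp : List (List (List Int))) (dpf : Int → Int → Int → Int) : Prop :=
  pvShape M B dp ∧ ∀ a b c : Int, 0 ≤ a → 0 ≤ b → 0 ≤ c → pvGet3 dp a b c = dpf a b c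

lemma pvFoldlRel {α β γ : Type} (R : α → β → Prop) (f : α → γ → α) (g : β → γ → β) :
    ∀ (L : List γ), (∀ a b c, c ∈ L → R a b → R (f a c) (g b c)) →
      ∀ a b, R a b → R (L.foldl f a) (L.foldl g b) := by
  intro L
  induction L with
  | nil => intro _ a b hR; simpa using hR
  | cons hd tl ih =>
    intro h a b hR
    simp only [List.foldl_cons]
    exact ih (fun a b c hc => h a b c (List.mem_cons_of_mem _ hc)) _ _
      (h a b hd List.mem_cons_self hR)

lemma pvGetDModify {α : Type} (l : List α) (i j : Nat) (f : α → α) (d : α) :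
    (l.modify i f).getD j d = if i = j ∧ j < l.length then f (l.getD j d) else l.getD j d := by
  simp only [List.getD_eq_getElem?_getD, List.getElem?_modify]
  by_cases hij : i = j
  · subst hij
    by_cases hj : i < l.length
    · simp [hj]
    · simp [hj]
  · simp [hij]

lemma pvGetDSet {α : Type} (l : List α) (i j : Nat) (v d : α) :
    (l.set i v).getD j d = if i = j ∧ j < l.length then v else l.getD j d := by
  simp only [List.getD_eq_getElem?_getD, List.getElem?_set]
  by_cases hij : i = j
  · subst hij
    by_cases hj : i < l.length
    · simp [hj]
    · simp [hj]
  · simp [hij]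

lemma pvShape_set3 (M B : Nat) (dp : List (List (List Int))) (u1 u2 u3 v : Int)
    (hS : pvShape M B dp) : pvShape M B (pvSet3 dp u1 u2 u3 v) := by
  obtain ⟨h1, h2⟩ := hS
  constructor
  · simpa [pvSet3] using h1
  · intro p hp
    rw [pvSet3, List.mem_iff_getElem] at hp
    obtain ⟨idx, hidx, hpe⟩ := hp
    rw [List.getElem_modify] at hpe
    by_cases hia : u1.toNat = idx
    · rw [if_pos hia] at hpe
      obtain ⟨hM, hrows⟩ := h2 _ (List.getElem_mem (by simpa using hidx))
      subst hpe
      constructor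
      · simpa [List.length_modify] using hM
      · intro q hq
        rw [List.mem_iff_getElem] at hq
        obtain ⟨jdx, hjdx, hqe⟩ := hq
        rw [List.getElem_modify] at hqe
        by_cases hjb : u2.toNat = jdx
        · rw [if_pos hjb] at hqe
          subst hqe
          simpa [List.length_set] using hrows _ (List.getElem_mem _)
        · rw [if_neg hjb] at hqe
          subst hqe
          exact hrows _ (List.getElem_mem _)
    · rw [if_neg hia] at hpe
      subst hpe
      exact h2 _ (List.getElem_mem _)

lemma pvGetDRep {α : Type} (n : Nat) (d d' : α) (i : Nat) :
    (List.replicate n d).getD i d' = if i < n then d else d' := by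
  rcases Nat.lt_or_ge i n with h | h
  · rw [List.getD_eq_getElem?_getD, List.getElem?_replicate, if_pos h, Option.getD_some, if_pos h]
  · rw [List.getD_eq_getElem?_getD, List.getElem?_eq_none (by simpa using h), Option.getD_none,
      if_neg (by omega)]

lemma pvGet3_replicate (M B : Nat) (r1 r2 r3 : Int) :
    pvGet3 (List.replicate 2 (List.replicate M (List.replicate B (0 : Int)))) r1 r2 r3 = 0 := by
  unfold pvGet3
  rw [pvGetDRep]
  split_ifs with h1
  · rw [pvGetDRep]
    split_ifs with h2
    · rw [pvGetDRep]
      split_ifs with h3 <;> rfl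
    · simp
  · simp

lemma pvGet3_set3 (M B : Nat) (dp : List (List (List Int))) (hS : pvShape M B dp)
    (u1 u2 u3 v r1 r2 r3 : Int)
    (hu1 : 0 ≤ u1) (hu1' : u1.toNat < 2) (hu2 : 0 ≤ u2) (hu2' : u2.toNat < M)
    (hu3 : 0 ≤ u3) (hu3' : u3.toNat < B)
    (hr1 : 0 ≤ r1) (hr2 : 0 ≤ r2) (hr3 : 0 ≤ r3) :
    pvGet3 (pvSet3 dp u1 u2 u3 v) r1 r2 r3
      = if r1 = u1 ∧ r2 = u2 ∧ r3 = u3 then v else pvGet3 dp r1 r2 r3 := by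
  obtain ⟨hlen, hrows⟩ := hS
  unfold pvGet3 pvSet3
  rw [pvGetDModify]
  by_cases h1 : u1.toNat = r1.toNat ∧ r1.toNat < dp.length
  · rw [if_pos h1]
    have hrl : (dp.getD r1.toNat []).length = M := by
      rw [List.getD_eq_getElem?_getD, List.getElem?_eq_getElem h1.2, Option.getD_some]
      exact (hrows _ (List.getElem_mem _)).1
    have hql : ∀ k : Nat, k < M → ((dp.getD r1.toNat []).getD k []).length = B := by
      intro k hk
      rw [List.getD_eq_getElem?_getD (l := (dp.getD r1.toNat [])),
        List.getElem?_eq_getElem (by omega), Option.getD_some]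
      refine ((hrows _ ?_).2) _ (List.getElem_mem _)
      rw [List.getD_eq_getElem?_getD, List.getElem?_eq_getElem h1.2, Option.getD_some]
      exact List.getElem_mem _
    rw [pvGetDModify]
    by_cases h2 : u2.toNat = r2.toNat ∧ r2.toNat < (dp.getD r1.toNat []).length
    · rw [if_pos h2, pvGetDSet]
      by_cases h3 : u3.toNat = r3.toNat ∧ r3.toNat < ((dp.getD r1.toNat []).getD r2.toNat []).length
      · rw [if_pos h3, if_pos (by omega : r1 = u1 ∧ r2 = u2 ∧ r3 = u3)]
      · have hqlen := hql r2.toNat (by omega)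
        rw [if_neg h3, if_neg (by omega : ¬(r1 = u1 ∧ r2 = u2 ∧ r3 = u3))]
    · have : ¬(r1 = u1 ∧ r2 = u2 ∧ r3 = u3) := by omega
      rw [if_neg h2, if_neg this]
  · have : ¬(r1 = u1 ∧ r2 = u2 ∧ r3 = u3) := by omega
    rw [if_neg h1, if_neg this]

lemma pvBridge (n m b mod : Int) (bugs_per_line : List Int) (hm : 0 ≤ m) (hb : 0 ≤ b)
    (hcosts : 1 ≤ n → 1 ≤ m → ∀ i : Int, 0 ≤ i → i < n → 0 ≤ PySem.List.pyGetD bugs_per_line i 0) :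
    count_good_plans n m b mod bugs_per_line = pvAfun n m b mod bugs_per_line := by
  have h2pos : (0 : Int) < 2 := by norm_num
  simp only [count_good_plans, pvAfun]
  refine ((pvFoldlRel (pvRel (m+1).toNat (b+1).toNat) _ _ (PySem.List.pyRange 1 (n+1) 1) ?step2 _ _
    ((pvFoldlRel (pvRel (m+1).toNat (b+1).toNat) _ _ (PySem.List.pyRange 0 (n+1) 1) ?step1 _ _
      ⟨?sh0, ?pt0⟩))).2) (PySem.Int.mod n 2) m b (PySem.Int.mod_nonneg _ h2pos) hm hb
  case sh0 =>
    refine ⟨by simp, ?_⟩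
    intro p hp
    rw [List.eq_of_mem_replicate hp]
    refine ⟨by simp, ?_⟩
    intro q hq
    rw [List.eq_of_mem_replicate hq]
    simp
  case pt0 =>
    intro a bb c _ _ _
    exact pvGet3_replicate _ _ _ _ _
  case step1 =>
    intro dp dpf i _ hR
    refine pvFoldlRel _ _ _ _ ?_ dp dpf hR
    intro dp dpf x hx hR
    have hx' := (PySem.List.mem_pyRange_one).mp hx
    refine ⟨pvShape_set3 _ _ _ _ _ _ _ hR.1, ?_⟩
    intro r1 r2 r3 h1 h2 h3
    rw [pvGet3_set3 _ _ _ hR.1 _ _ _ _ _ _ _ (PySem.Int.mod_nonneg _ h2pos)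
      (by have := PySem.Int.mod_lt i h2pos; omega)
      (le_refl 0) (by omega) hx'.1 (by omega) h1 h2 h3]
    simp only [pvUpd]
    split_ifs with hC
    · rfl
    · exact hR.2 r1 r2 r3 h1 h2 h3
  case step2 =>
    intro dp dpf i hi hR
    have hi' := (PySem.List.mem_pyRange_one).mp hi
    refine pvFoldlRel _ _ _ _ ?_ dp dpf hR
    intro dp dpf j hj hR
    have hj' := (PySem.List.mem_pyRange_one).mp hj
    refine pvFoldlRel _ _ _ _ ?_ dp dpf hR
    intro dp dpf x hx hR
    have hx' := (PySem.List.mem_pyRange_one).mp hx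
    have hc0 : 0 ≤ PySem.List.pyGetD bugs_per_line (i-1) 0 :=
      hcosts (by omega) (by omega) (i-1) (by omega) (by omega)
    have hQ := hR.2 (PySem.Int.mod (i-1) 2) j x (PySem.Int.mod_nonneg _ h2pos) (by omega) (by omega)
    by_cases hcx : PySem.List.pyGetD bugs_per_line (i-1) 0 ≤ x
    · rw [if_pos hcx, if_pos hcx]
      have hP := hR.2 (PySem.Int.mod i 2) (j-1) (x - PySem.List.pyGetD bugs_per_line (i-1) 0)
        (PySem.Int.mod_nonneg _ h2pos) (by omega) (by omega)
      refine ⟨pvShape_set3 _ _ _ _ _ _ _ hR.1, ?_⟩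
      intro r1 r2 r3 h1 h2 h3
      rw [pvGet3_set3 _ _ _ hR.1 _ _ _ _ _ _ _ (PySem.Int.mod_nonneg _ h2pos)
        (by have := PySem.Int.mod_lt i h2pos; omega)
        (by omega) (by omega) (by omega) (by omega) h1 h2 h3, hQ, hP]
      simp only [pvUpd]
      split_ifs with hC
      · rfl
      · exact hR.2 r1 r2 r3 h1 h2 h3
    · rw [if_neg hcx, if_neg hcx]
      refine ⟨pvShape_set3 _ _ _ _ _ _ _ hR.1, ?_⟩
      intro r1 r2 r3 h1 h2 h3
      rw [pvGet3_set3 _ _ _ hR.1 _ _ _ _ _ _ _ (PySem.Int.mod_nonneg _ h2pos)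
        (by have := PySem.Int.mod_lt i h2pos; omega)
        (by omega) (by omega) (by omega) (by omega) h1 h2 h3, hQ]
      simp only [pvUpd]
      split_ifs with hC
      · rfl
      · exact hR.2 r1 r2 r3 h1 h2 h3

-- pvAltF facts ---------------------------------------------------------------

lemma pvAltF_zero (bugs : List Int) (mod : Int) (i : Nat) (x : Int) :
    pvAltF bugs mod i 0 x = 1 := by
  cases i <;> simp [pvAltF, pvAltRow]

lemma pvAltF_zero_succ (bugs : List Int) (mod : Int) (l : Nat) (x : Int) :
    pvAltF bugs mod 0 (l+1) x = 0 := by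
  simp [pvAltF]

lemma pvAltF_succ (bugs : List Int) (mod : Int) (k l : Nat) (x : Int) :
    pvAltF bugs mod (k+1) (l+1) x =
      PySem.Int.mod
        (if PySem.List.pyGetD bugs (Int.ofNat k) 0 ≤ x
          then pvAltF bugs mod k (l+1) x +
               pvAltF bugs mod (k+1) l (x - PySem.List.pyGetD bugs (Int.ofNat k) 0)
          else pvAltF bugs mod k (l+1) x) mod := by
  conv_lhs => rw [pvAltF]
  rw [pvAltRow]
  have : pvAltRow mod (pvAltF bugs mod k) (PySem.List.pyGetD bugs (Int.ofNat k) 0) l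
      (x - PySem.List.pyGetD bugs (Int.ofNat k) 0)
      = pvAltF bugs mod (k+1) l (x - PySem.List.pyGetD bugs (Int.ofNat k) 0) := by
    rw [pvAltF]
  rw [this]

lemma pvAltF_succ' (bugs : List Int) (mod : Int) (k l : Nat) (x : Int) :
    pvAltF bugs mod (k+1) (l+1) x =
      PySem.Int.mod
        (if PySem.List.pyGetD bugs ((k : Int) + 1 - 1) 0 ≤ x
          then pvAltF bugs mod k (l+1) x +
               pvAltF bugs mod (k+1) l (x - PySem.List.pyGetD bugs ((k : Int) + 1 - 1) 0)
          else pvAltF bugs mod k (l+1) x) mod := by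
  have hkk : ((k : Int) + 1 - 1) = Int.ofNat k := by simp
  rw [hkk, pvAltF_succ]

-- parity helpers -------------------------------------------------------------

lemma pvMod2 (a : Int) : PySem.Int.mod a 2 = a % 2 :=
  PySem.Int.mod_eq_emod_of_pos (by norm_num)

-- the base-case x-loop -------------------------------------------------------

lemma pvBaseX (b : Int) (p : Int) :
    ∀ (t : Nat) (lo : Int) (dp : Int → Int → Int → Int), lo + t = b + 1 →
      ∀ a' j' x',
        ((PySem.List.pyRange lo (b+1) 1).foldl (fun dp x => pvUpd dp p 0 x 1) dp) a' j' x'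
          = if a' = p ∧ j' = 0 ∧ lo ≤ x' ∧ x' ≤ b then 1 else dp a' j' x' := by
  intro t
  induction t with
  | zero =>
    intro lo dp h a' j' x'
    rw [PySem.List.pyRange_one_eq_nil (by omega)]
    rw [List.foldl_nil, if_neg (by omega)]
  | succ t ih =>
    intro lo dp h a' j' x'
    rw [PySem.List.pyRange_one_cons (by omega), List.foldl_cons]
    rw [ih (lo+1) _ (by omega)]
    simp only [pvUpd]
    split_ifs <;> first | rfl | omega

-- the base-case i-loop -------------------------------------------------------

lemma pvBaseI (b : Int) (hb : 0 ≤ b) :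
    ∀ (L : List Int) (dp : Int → Int → Int → Int) (a' j' x' : Int),
      (L.foldl (fun dp i =>
          (PySem.List.pyRange 0 (b+1) 1).foldl (fun dp x => pvUpd dp (PySem.Int.mod i 2) 0 x 1) dp) dp) a' j' x'
        = if j' = 0 ∧ 0 ≤ x' ∧ x' ≤ b ∧ (∃ i ∈ L, PySem.Int.mod i 2 = a') then 1
          else dp a' j' x' := by
  intro L
  induction L with
  | nil => intro dp a' j' x'; simp
  | cons hd tl ih =>
    intro dp a' j' x'
    rw [List.foldl_cons, ih]
    rw [pvBaseX b (PySem.Int.mod hd 2) (b+1).toNat 0 dp (by omega)]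
    simp only [List.exists_mem_cons_iff]
    by_cases hJ : j' = 0 ∧ 0 ≤ x' ∧ x' ≤ b
    · by_cases hE : ∃ i ∈ tl, PySem.Int.mod i 2 = a'
      · rw [if_pos ⟨hJ.1, hJ.2.1, hJ.2.2, hE⟩, if_pos ⟨hJ.1, hJ.2.1, hJ.2.2, Or.inr hE⟩]
      · rw [if_neg (fun h => hE h.2.2.2)]
        by_cases hH : PySem.Int.mod hd 2 = a'
        · rw [if_pos ⟨hH.symm, hJ.1, hJ.2.1, hJ.2.2⟩,
              if_pos ⟨hJ.1, hJ.2.1, hJ.2.2, Or.inl hH⟩]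
        · rw [if_neg (fun h => hH h.1.symm),
              if_neg (fun h => h.2.2.2.elim hH (fun e => hE e))]
    · rw [if_neg (fun h => hJ ⟨h.1, h.2.1, h.2.2.1⟩),
          if_neg (fun h => hJ ⟨h.2.1, h.2.2.1, h.2.2.2⟩),
          if_neg (fun h => hJ ⟨h.1, h.2.1, h.2.2.1⟩)]

-- the fill x-loop ------------------------------------------------------------

lemma pvFillX (bugs : List Int) (mod b : Int) (k l : Nat) (_hb : 0 ≤ b)
    (hc : 0 ≤ PySem.List.pyGetD bugs ((k : Int) + 1 - 1) 0) :
    ∀ (t : Nat) (lo : Int) (dp : Int → Int → Int → Int), 0 ≤ lo → lo + t = b + 1 →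
      (∀ x, 0 ≤ x → x ≤ b →
        dp (PySem.Int.mod ((k : Int) + 1 - 1) 2) ((l : Int) + 1) x = pvAltF bugs mod k (l+1) x) →
      (∀ x, 0 ≤ x → x ≤ b →
        dp (PySem.Int.mod ((k : Int) + 1) 2) ((l : Int) + 1 - 1) x = pvAltF bugs mod (k+1) l x) →
      ∀ a' j' x',
        ((PySem.List.pyRange lo (b+1) 1).foldl (fun dp x =>
            if PySem.List.pyGetD bugs ((k : Int) + 1 - 1) 0 ≤ x then
              pvUpd dp (PySem.Int.mod ((k : Int) + 1) 2) ((l : Int) + 1) x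
                (PySem.Int.mod
                  (dp (PySem.Int.mod ((k : Int) + 1 - 1) 2) ((l : Int) + 1) x +
                    dp (PySem.Int.mod ((k : Int) + 1) 2) ((l : Int) + 1 - 1)
                      (x - PySem.List.pyGetD bugs ((k : Int) + 1 - 1) 0)) mod)
            else
              pvUpd dp (PySem.Int.mod ((k : Int) + 1) 2) ((l : Int) + 1) x
                (PySem.Int.mod (dp (PySem.Int.mod ((k : Int) + 1 - 1) 2) ((l : Int) + 1) x) mod)) dp) a' j' x'
          = if a' = PySem.Int.mod ((k : Int) + 1) 2 ∧ j' = (l : Int) + 1 ∧ lo ≤ x' ∧ x' ≤ b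
            then pvAltF bugs mod (k+1) (l+1) x' else dp a' j' x' := by
  intro t
  induction t with
  | zero =>
    intro lo dp h0 hsum hq hp a' j' x'
    rw [PySem.List.pyRange_one_eq_nil (by omega), List.foldl_nil, if_neg (by omega)]
  | succ t ih =>
    intro lo dp h0 hsum hq hp a' j' x'
    have hPQ : PySem.Int.mod ((k : Int) + 1 - 1) 2 ≠ PySem.Int.mod ((k : Int) + 1) 2 := by
      rw [pvMod2, pvMod2]; omega
    have hlob : lo ≤ b := by omega
    rw [PySem.List.pyRange_one_cons (by omega)]
    simp only [List.foldl_cons]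
    have hstep : (if PySem.List.pyGetD bugs ((k : Int) + 1 - 1) 0 ≤ lo then
              pvUpd dp (PySem.Int.mod ((k : Int) + 1) 2) ((l : Int) + 1) lo
                (PySem.Int.mod
                  (dp (PySem.Int.mod ((k : Int) + 1 - 1) 2) ((l : Int) + 1) lo +
                    dp (PySem.Int.mod ((k : Int) + 1) 2) ((l : Int) + 1 - 1)
                      (lo - PySem.List.pyGetD bugs ((k : Int) + 1 - 1) 0)) mod)
            else
              pvUpd dp (PySem.Int.mod ((k : Int) + 1) 2) ((l : Int) + 1) lo
                (PySem.Int.mod (dp (PySem.Int.mod ((k : Int) + 1 - 1) 2) ((l : Int) + 1) lo) mod))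
          = pvUpd dp (PySem.Int.mod ((k : Int) + 1) 2) ((l : Int) + 1) lo
              (pvAltF bugs mod (k+1) (l+1) lo) := by
      by_cases hcl : PySem.List.pyGetD bugs ((k : Int) + 1 - 1) 0 ≤ lo
      · rw [if_pos hcl, hq lo h0 hlob, hp (lo - PySem.List.pyGetD bugs ((k : Int) + 1 - 1) 0)
            (by omega) (by omega), pvAltF_succ', if_pos hcl]
      · rw [if_neg hcl, hq lo h0 hlob, pvAltF_succ', if_neg hcl]
    rw [hstep]
    have hq' : ∀ x, 0 ≤ x → x ≤ b →
        (pvUpd dp (PySem.Int.mod ((k : Int) + 1) 2) ((l : Int) + 1) lo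
          (pvAltF bugs mod (k+1) (l+1) lo)) (PySem.Int.mod ((k : Int) + 1 - 1) 2) ((l : Int) + 1) x
          = pvAltF bugs mod k (l+1) x := by
      intro x hx1 hx2
      simp only [pvUpd]
      rw [if_neg (fun h => hPQ h.1)]
      exact hq x hx1 hx2
    have hp' : ∀ x, 0 ≤ x → x ≤ b →
        (pvUpd dp (PySem.Int.mod ((k : Int) + 1) 2) ((l : Int) + 1) lo
          (pvAltF bugs mod (k+1) (l+1) lo)) (PySem.Int.mod ((k : Int) + 1) 2) ((l : Int) + 1 - 1) x
          = pvAltF bugs mod (k+1) l x := by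
      intro x hx1 hx2
      simp only [pvUpd]
      rw [if_neg (fun h => absurd h.2.1 (by omega))]
      exact hp x hx1 hx2
    rw [ih (lo+1) _ (by omega) (by omega) hq' hp' a' j' x']
    by_cases hC : a' = PySem.Int.mod ((k : Int) + 1) 2 ∧ j' = (l : Int) + 1 ∧ lo ≤ x' ∧ x' ≤ b
    · rw [if_pos hC]
      by_cases hxl : x' = lo
      · rw [if_neg (fun h => absurd h.2.2.1 (by omega))]
        simp only [pvUpd]
        rw [if_pos ⟨hC.1, hC.2.1, hxl⟩, hxl]
      · rw [if_pos ⟨hC.1, hC.2.1, by omega, hC.2.2.2⟩]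
    · rw [if_neg hC, if_neg (fun h => hC ⟨h.1, h.2.1, by omega, h.2.2.2⟩)]
      simp only [pvUpd]
      rw [if_neg (fun h => hC ⟨h.1, h.2.1, by omega, by omega⟩)]

-- the fill j-loop ------------------------------------------------------------

lemma pvFillJ (bugs : List Int) (mod b m : Int) (k : Nat) (hb : 0 ≤ b)
    (hc : 0 ≤ PySem.List.pyGetD bugs ((k : Int) + 1 - 1) 0) :
    ∀ (t : Nat) (jlo : Int) (dp : Int → Int → Int → Int), 1 ≤ jlo → jlo + t = m + 1 →
      (∀ j x, 0 ≤ j → j ≤ m → 0 ≤ x → x ≤ b →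
        dp (PySem.Int.mod ((k : Int) + 1 - 1) 2) j x = pvAltF bugs mod k j.toNat x) →
      (∀ j x, 0 ≤ j → j < jlo → 0 ≤ x → x ≤ b →
        dp (PySem.Int.mod ((k : Int) + 1) 2) j x = pvAltF bugs mod (k+1) j.toNat x) →
      ∀ a' j' x',
        ((PySem.List.pyRange jlo (m+1) 1).foldl (fun dp j =>
          (PySem.List.pyRange 0 (b+1) 1).foldl (fun dp x =>
            if PySem.List.pyGetD bugs ((k : Int) + 1 - 1) 0 ≤ x then
              pvUpd dp (PySem.Int.mod ((k : Int) + 1) 2) j x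
                (PySem.Int.mod
                  (dp (PySem.Int.mod ((k : Int) + 1 - 1) 2) j x +
                    dp (PySem.Int.mod ((k : Int) + 1) 2) (j - 1)
                      (x - PySem.List.pyGetD bugs ((k : Int) + 1 - 1) 0)) mod)
            else
              pvUpd dp (PySem.Int.mod ((k : Int) + 1) 2) j x
                (PySem.Int.mod (dp (PySem.Int.mod ((k : Int) + 1 - 1) 2) j x) mod)) dp) dp) a' j' x'
          = if a' = PySem.Int.mod ((k : Int) + 1) 2 ∧ jlo ≤ j' ∧ j' ≤ m ∧ 0 ≤ x' ∧ x' ≤ b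
            then pvAltF bugs mod (k+1) j'.toNat x' else dp a' j' x' := by
  intro t
  induction t with
  | zero =>
    intro jlo dp hj1 hsum hQ hP a' j' x'
    rw [show PySem.List.pyRange jlo (m+1) 1 = [] from PySem.List.pyRange_one_eq_nil (by omega),
      List.foldl_nil, if_neg (by omega)]
  | succ t ih =>
    intro jlo dp hj1 hsum hQ hP a' j' x'
    obtain ⟨l, rfl⟩ : ∃ l : Nat, jlo = (l : Int) + 1 := ⟨(jlo - 1).toNat, by omega⟩
    have hPQ : PySem.Int.mod ((k : Int) + 1 - 1) 2 ≠ PySem.Int.mod ((k : Int) + 1) 2 := by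
      rw [pvMod2, pvMod2]; omega
    rw [show PySem.List.pyRange ((l : Int) + 1) (m+1) 1
        = ((l : Int) + 1) :: PySem.List.pyRange ((l : Int) + 1 + 1) (m+1) 1 from
        PySem.List.pyRange_one_cons (by omega)]
    simp only [List.foldl_cons]
    have hq1 : ∀ x, 0 ≤ x → x ≤ b →
        dp (PySem.Int.mod ((k : Int) + 1 - 1) 2) ((l : Int) + 1) x = pvAltF bugs mod k (l+1) x := by
      intro x hx1 hx2
      have h := hQ ((l : Int) + 1) x (by omega) (by omega) hx1 hx2
      rwa [show ((l : Int) + 1).toNat = l + 1 from by omega] at h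
    have hp1 : ∀ x, 0 ≤ x → x ≤ b →
        dp (PySem.Int.mod ((k : Int) + 1) 2) ((l : Int) + 1 - 1) x = pvAltF bugs mod (k+1) l x := by
      intro x hx1 hx2
      have h := hP ((l : Int) + 1 - 1) x (by omega) (by omega) hx1 hx2
      rwa [show ((l : Int) + 1 - 1).toNat = l from by omega] at h
    have hchar := pvFillX bugs mod b k l hb hc (b+1).toNat 0 dp (le_refl 0) (by omega) hq1 hp1
    have hQ' : ∀ j x, 0 ≤ j → j ≤ m → 0 ≤ x → x ≤ b →
        ((PySem.List.pyRange 0 (b+1) 1).foldl (fun dp x =>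
            if PySem.List.pyGetD bugs ((k : Int) + 1 - 1) 0 ≤ x then
              pvUpd dp (PySem.Int.mod ((k : Int) + 1) 2) ((l : Int) + 1) x
                (PySem.Int.mod
                  (dp (PySem.Int.mod ((k : Int) + 1 - 1) 2) ((l : Int) + 1) x +
                    dp (PySem.Int.mod ((k : Int) + 1) 2) ((l : Int) + 1 - 1)
                      (x - PySem.List.pyGetD bugs ((k : Int) + 1 - 1) 0)) mod)
            else
              pvUpd dp (PySem.Int.mod ((k : Int) + 1) 2) ((l : Int) + 1) x
                (PySem.Int.mod (dp (PySem.Int.mod ((k : Int) + 1 - 1) 2) ((l : Int) + 1) x) mod)) dp) (PySem.Int.mod ((k : Int) + 1 - 1) 2) j x = pvAltF bugs mod k j.toNat x := by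
      intro j x hj0 hjm hx1 hx2
      rw [hchar, if_neg (fun h => hPQ h.1)]
      exact hQ j x hj0 hjm hx1 hx2
    have hP' : ∀ j x, 0 ≤ j → j < (l : Int) + 1 + 1 → 0 ≤ x → x ≤ b →
        ((PySem.List.pyRange 0 (b+1) 1).foldl (fun dp x =>
            if PySem.List.pyGetD bugs ((k : Int) + 1 - 1) 0 ≤ x then
              pvUpd dp (PySem.Int.mod ((k : Int) + 1) 2) ((l : Int) + 1) x
                (PySem.Int.mod
                  (dp (PySem.Int.mod ((k : Int) + 1 - 1) 2) ((l : Int) + 1) x +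
                    dp (PySem.Int.mod ((k : Int) + 1) 2) ((l : Int) + 1 - 1)
                      (x - PySem.List.pyGetD bugs ((k : Int) + 1 - 1) 0)) mod)
            else
              pvUpd dp (PySem.Int.mod ((k : Int) + 1) 2) ((l : Int) + 1) x
                (PySem.Int.mod (dp (PySem.Int.mod ((k : Int) + 1 - 1) 2) ((l : Int) + 1) x) mod)) dp) (PySem.Int.mod ((k : Int) + 1) 2) j x = pvAltF bugs mod (k+1) j.toNat x := by
      intro j x hj0 hjlt hx1 hx2
      rw [hchar]
      by_cases hjl : j = (l : Int) + 1
      · rw [if_pos ⟨rfl, hjl, hx1, hx2⟩, hjl, show ((l : Int) + 1).toNat = l + 1 from by omega]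
      · rw [if_neg (fun h => hjl h.2.1)]
        exact hP j x hj0 (by omega) hx1 hx2
    rw [ih ((l : Int) + 1 + 1) ((PySem.List.pyRange 0 (b+1) 1).foldl (fun dp x =>
            if PySem.List.pyGetD bugs ((k : Int) + 1 - 1) 0 ≤ x then
              pvUpd dp (PySem.Int.mod ((k : Int) + 1) 2) ((l : Int) + 1) x
                (PySem.Int.mod
                  (dp (PySem.Int.mod ((k : Int) + 1 - 1) 2) ((l : Int) + 1) x +
                    dp (PySem.Int.mod ((k : Int) + 1) 2) ((l : Int) + 1 - 1)
                      (x - PySem.List.pyGetD bugs ((k : Int) + 1 - 1) 0)) mod)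
            else
              pvUpd dp (PySem.Int.mod ((k : Int) + 1) 2) ((l : Int) + 1) x
                (PySem.Int.mod (dp (PySem.Int.mod ((k : Int) + 1 - 1) 2) ((l : Int) + 1) x) mod)) dp) (by omega) (by omega) hQ' hP' a' j' x']
    by_cases hC : a' = PySem.Int.mod ((k : Int) + 1) 2 ∧ (l : Int) + 1 ≤ j' ∧ j' ≤ m ∧ 0 ≤ x' ∧ x' ≤ b
    · rw [if_pos hC]
      by_cases hjl : j' = (l : Int) + 1
      · rw [if_neg (fun h => absurd h.2.1 (by omega))]
        rw [hchar, if_pos ⟨hC.1, hjl, hC.2.2.2.1, hC.2.2.2.2⟩, hjl,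
          show ((l : Int) + 1).toNat = l + 1 from by omega]
      · rw [if_pos ⟨hC.1, by omega, hC.2.2.1, hC.2.2.2⟩]
    · rw [if_neg hC, if_neg (fun h => hC ⟨h.1, by omega, h.2.2.1, h.2.2.2⟩)]
      rw [hchar, if_neg (fun h => hC ⟨h.1, by omega, by omega, h.2.2.1, h.2.2.2⟩)]

-- the fill i-loop ------------------------------------------------------------

lemma pvFillI (bugs : List Int) (mod b m n : Int) (hb : 0 ≤ b) (hm : 0 ≤ m)
    (hcosts : ∀ i : Int, 0 ≤ i → i < n → 0 ≤ PySem.List.pyGetD bugs i 0) :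
    ∀ (t : Nat) (ilo : Int) (dp : Int → Int → Int → Int), 1 ≤ ilo → ilo + t = n + 1 →
      (∀ j x, 0 ≤ j → j ≤ m → 0 ≤ x → x ≤ b →
        dp (PySem.Int.mod (ilo - 1) 2) j x = pvAltF bugs mod (ilo - 1).toNat j.toNat x) →
      (∀ x, 0 ≤ x → x ≤ b → dp (PySem.Int.mod ilo 2) 0 x = 1) →
      ∀ j x, 0 ≤ j → j ≤ m → 0 ≤ x → x ≤ b →
        ((PySem.List.pyRange ilo (n+1) 1).foldl (fun dp i =>
          (PySem.List.pyRange 1 (m+1) 1).foldl (fun dp j =>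
            (PySem.List.pyRange 0 (b+1) 1).foldl (fun dp x =>
              if PySem.List.pyGetD bugs (i - 1) 0 ≤ x then
                pvUpd dp (PySem.Int.mod i 2) j x
                  (PySem.Int.mod
                    (dp (PySem.Int.mod (i - 1) 2) j x +
                      dp (PySem.Int.mod i 2) (j - 1)
                        (x - PySem.List.pyGetD bugs (i - 1) 0)) mod)
              else
                pvUpd dp (PySem.Int.mod i 2) j x
                  (PySem.Int.mod (dp (PySem.Int.mod (i - 1) 2) j x) mod)) dp) dp) dp)
          (PySem.Int.mod n 2) j x
          = pvAltF bugs mod n.toNat j.toNat x := by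
  intro t
  induction t with
  | zero =>
    intro ilo dp h1 hsum hcur hoth j x hj0 hjm hx1 hx2
    rw [show PySem.List.pyRange ilo (n+1) 1 = [] from PySem.List.pyRange_one_eq_nil (by omega),
      List.foldl_nil]
    have h := hcur j x hj0 hjm hx1 hx2
    rwa [show ilo - 1 = n from by omega] at h
  | succ t ih =>
    intro ilo dp h1 hsum hcur hoth j x hj0 hjm hx1 hx2
    obtain ⟨k, rfl⟩ : ∃ k : Nat, ilo = (k : Int) + 1 := ⟨(ilo - 1).toNat, by omega⟩
    rw [show PySem.List.pyRange ((k : Int) + 1) (n+1) 1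
        = ((k : Int) + 1) :: PySem.List.pyRange ((k : Int) + 1 + 1) (n+1) 1 from
        PySem.List.pyRange_one_cons (by omega)]
    simp only [List.foldl_cons]
    have hck : 0 ≤ PySem.List.pyGetD bugs ((k : Int) + 1 - 1) 0 := by
      have h := hcosts ((k : Int)) (by positivity) (by omega)
      rwa [show ((k : Int) + 1 - 1) = (k : Int) from by ring]
    have hQall : ∀ j x, 0 ≤ j → j ≤ m → 0 ≤ x → x ≤ b →
        dp (PySem.Int.mod ((k : Int) + 1 - 1) 2) j x = pvAltF bugs mod k j.toNat x := by
      intro j x hj0 hjm hx1 hx2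
      have h := hcur j x hj0 hjm hx1 hx2
      rwa [show ((k : Int) + 1 - 1).toNat = k from by omega] at h
    have hPd : ∀ j x, 0 ≤ j → j < 1 → 0 ≤ x → x ≤ b →
        dp (PySem.Int.mod ((k : Int) + 1) 2) j x = pvAltF bugs mod (k+1) j.toNat x := by
      intro j x hj0 hjlt hx1 hx2
      have hj : j = 0 := by omega
      subst hj
      rw [hoth x hx1 hx2]
      simp [pvAltF_zero]
    have hchar := pvFillJ bugs mod b m k hb hck m.toNat 1 dp (le_refl 1) (by omega) hQall hPd
    have hcur' : ∀ j x, 0 ≤ j → j ≤ m → 0 ≤ x → x ≤ b →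
        ((PySem.List.pyRange 1 (m+1) 1).foldl (fun dp j =>
          (PySem.List.pyRange 0 (b+1) 1).foldl (fun dp x =>
            if PySem.List.pyGetD bugs ((k : Int) + 1 - 1) 0 ≤ x then
              pvUpd dp (PySem.Int.mod ((k : Int) + 1) 2) j x
                (PySem.Int.mod
                  (dp (PySem.Int.mod ((k : Int) + 1 - 1) 2) j x +
                    dp (PySem.Int.mod ((k : Int) + 1) 2) (j - 1)
                      (x - PySem.List.pyGetD bugs ((k : Int) + 1 - 1) 0)) mod)
            else
              pvUpd dp (PySem.Int.mod ((k : Int) + 1) 2) j x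
                (PySem.Int.mod (dp (PySem.Int.mod ((k : Int) + 1 - 1) 2) j x) mod)) dp) dp) (PySem.Int.mod ((k : Int) + 1 + 1 - 1) 2) j x
          = pvAltF bugs mod ((k : Int) + 1 + 1 - 1).toNat j.toNat x := by
      intro j x hj0 hjm hx1 hx2
      rw [show ((k : Int) + 1 + 1 - 1) = (k : Int) + 1 from by ring,
        show ((k : Int) + 1).toNat = k + 1 from by omega, hchar]
      by_cases hj1' : 1 ≤ j
      · rw [if_pos ⟨rfl, hj1', hjm, hx1, hx2⟩]
      · rw [if_neg (fun h => absurd h.2.1 (by omega))]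
        have hj : j = 0 := by omega
        subst hj
        rw [hoth x hx1 hx2]
        simp [pvAltF_zero]
    have hoth' : ∀ x, 0 ≤ x → x ≤ b → ((PySem.List.pyRange 1 (m+1) 1).foldl (fun dp j =>
          (PySem.List.pyRange 0 (b+1) 1).foldl (fun dp x =>
            if PySem.List.pyGetD bugs ((k : Int) + 1 - 1) 0 ≤ x then
              pvUpd dp (PySem.Int.mod ((k : Int) + 1) 2) j x
                (PySem.Int.mod
                  (dp (PySem.Int.mod ((k : Int) + 1 - 1) 2) j x +
                    dp (PySem.Int.mod ((k : Int) + 1) 2) (j - 1)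
                      (x - PySem.List.pyGetD bugs ((k : Int) + 1 - 1) 0)) mod)
            else
              pvUpd dp (PySem.Int.mod ((k : Int) + 1) 2) j x
                (PySem.Int.mod (dp (PySem.Int.mod ((k : Int) + 1 - 1) 2) j x) mod)) dp) dp) (PySem.Int.mod ((k : Int) + 1 + 1) 2) 0 x = 1 := by
      intro x hx1 hx2
      have hne : PySem.Int.mod ((k : Int) + 1 + 1) 2 ≠ PySem.Int.mod ((k : Int) + 1) 2 := by
        rw [pvMod2, pvMod2]; omega
      rw [hchar, if_neg (fun h => hne h.1),
        show PySem.Int.mod ((k : Int) + 1 + 1) 2 = PySem.Int.mod ((k : Int) + 1 - 1) 2 from by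
          rw [pvMod2, pvMod2]; omega,
        hQall 0 x (by omega) hm hx1 hx2]
      simp [pvAltF_zero]
    exact ih ((k : Int) + 1 + 1) ((PySem.List.pyRange 1 (m+1) 1).foldl (fun dp j =>
          (PySem.List.pyRange 0 (b+1) 1).foldl (fun dp x =>
            if PySem.List.pyGetD bugs ((k : Int) + 1 - 1) 0 ≤ x then
              pvUpd dp (PySem.Int.mod ((k : Int) + 1) 2) j x
                (PySem.Int.mod
                  (dp (PySem.Int.mod ((k : Int) + 1 - 1) 2) j x +
                    dp (PySem.Int.mod ((k : Int) + 1) 2) (j - 1)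
                      (x - PySem.List.pyGetD bugs ((k : Int) + 1 - 1) 0)) mod)
            else
              pvUpd dp (PySem.Int.mod ((k : Int) + 1) 2) j x
                (PySem.Int.mod (dp (PySem.Int.mod ((k : Int) + 1 - 1) 2) j x) mod)) dp) dp) (by omega) (by omega) hcur' hoth' j x hj0 hjm hx1 hx2

-- ===== VERDICT (by name: the statement is the Claim_ definition above) =====
theorem count_good_plans_spec : Claim_unchanged_count_good_plans := by
  intro n m b mod bugs hdom hpre hnd
  obtain ⟨hm, hb, hfill⟩ := hpre
  show count_good_plans n m b mod bugs = count_good_plans_alt n m b mod bugs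
  rw [pvBridge n m b mod bugs hm hb (fun h1 h2 => (hfill h1 h2).2.2)]
  simp only [pvAfun, count_good_plans_alt]
  by_cases hn1 : 1 ≤ n
  · by_cases hm1 : 1 ≤ m
    · obtain ⟨hmod, hlen, hcosts⟩ := hfill hn1 hm1
      have hbase := pvBaseI b hb (PySem.List.pyRange 0 (n+1) 1)
        (fun _ _ _ => (0 : Int))
      have hcur : ∀ j x, 0 ≤ j → j ≤ m → 0 ≤ x → x ≤ b →
          ((PySem.List.pyRange 0 (n+1) 1).foldl (fun dp i =>
              (PySem.List.pyRange 0 (b+1) 1).foldl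
                (fun dp x => pvUpd dp (PySem.Int.mod i 2) 0 x 1) dp) (fun _ _ _ => (0 : Int)))
            (PySem.Int.mod ((1 : Int) - 1) 2) j x = pvAltF bugs mod ((1 : Int) - 1).toNat j.toNat x := by
        intro j x hj0 hjm hx1 hx2
        rw [show (1 : Int) - 1 = 0 from by ring, hbase]
        by_cases hj : j = 0
        · subst hj
          rw [if_pos ⟨rfl, hx1, hx2,
            ⟨0, (PySem.List.mem_pyRange_one).mpr ⟨le_refl 0, by omega⟩, rfl⟩⟩]
          simp [pvAltF_zero]
        · rw [if_neg (fun h => hj h.1)]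
          obtain ⟨l, hl⟩ : ∃ l : Nat, j.toNat = l + 1 := ⟨j.toNat - 1, by omega⟩
          rw [hl]
          simp [pvAltF_zero_succ]
      have hoth : ∀ x, 0 ≤ x → x ≤ b →
          ((PySem.List.pyRange 0 (n+1) 1).foldl (fun dp i =>
              (PySem.List.pyRange 0 (b+1) 1).foldl
                (fun dp x => pvUpd dp (PySem.Int.mod i 2) 0 x 1) dp) (fun _ _ _ => (0 : Int)))
            (PySem.Int.mod 1 2) 0 x = 1 := by
        intro x hx1 hx2
        rw [hbase, if_pos ⟨rfl, hx1, hx2,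
          ⟨1, (PySem.List.mem_pyRange_one).mpr ⟨by omega, by omega⟩, rfl⟩⟩]
      exact pvFillI bugs mod b m n hb hm hcosts n.toNat 1 _ (le_refl 1) (by omega) hcur hoth
        m b hm (le_refl m) hb (le_refl b)
    · have hm0 : m = 0 := by omega
      subst hm0
      rw [show PySem.List.pyRange 1 ((0 : Int) + 1) 1 = [] from
        PySem.List.pyRange_one_eq_nil (by norm_num)]
      simp only [List.foldl_nil]
      rw [List.foldl_fixed]
      rw [pvBaseI b hb, if_pos ⟨rfl, hb, le_refl b,
        ⟨n, (PySem.List.mem_pyRange_one).mpr ⟨by omega, by omega⟩, rfl⟩⟩]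
      simp [pvAltF_zero]
  · by_cases hnz : n = 0
    · subst hnz
      rw [show PySem.List.pyRange 1 ((0 : Int) + 1) 1 = [] from
        PySem.List.pyRange_one_eq_nil (by norm_num), List.foldl_nil]
      rw [pvBaseI b hb]
      by_cases hm0 : m = 0
      · subst hm0
        rw [if_pos ⟨rfl, hb, le_refl b,
          ⟨0, (PySem.List.mem_pyRange_one).mpr ⟨le_refl 0, by omega⟩, rfl⟩⟩]
        simp [pvAltF_zero]
      · rw [if_neg (fun h => hm0 h.1)]
        obtain ⟨l, hl⟩ : ∃ l : Nat, m.toNat = l + 1 := ⟨m.toNat - 1, by omega⟩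
        simp only [hl]
        simp [pvAltF_zero_succ]
    · have hmne : m ≠ 0 := fun h => hnd ⟨by omega, h⟩
      rw [show PySem.List.pyRange 0 (n+1) 1 = [] from PySem.List.pyRange_one_eq_nil (by omega),
        show PySem.List.pyRange 1 (n+1) 1 = [] from PySem.List.pyRange_one_eq_nil (by omega),
        List.foldl_nil, List.foldl_nil]
      obtain ⟨l, hl⟩ : ∃ l : Nat, m.toNat = l + 1 := ⟨m.toNat - 1, by omega⟩
      have hnt : n.toNat = 0 := by omega
      simp only [hl, hnt]
      simp [pvAltF_zero_succ]
theorem count_good_plans_changed : Claim_changed_count_good_plans := by unfold Claim_changed_count_good_plans; decide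
theorem count_good_plans_tight : Claim_exact_count_good_plans := by
  intro n m b mod bugs hdom hpre hD
  obtain ⟨hn, hm0⟩ := hD
  obtain ⟨hm, hb, hfill⟩ := hpre
  subst hm0
  rw [pvBridge n 0 b mod bugs hm hb (fun h1 h2 => (hfill h1 h2).2.2)]
  simp only [pvAfun, count_good_plans_alt]
  rw [show PySem.List.pyRange 0 (n+1) 1 = [] from PySem.List.pyRange_one_eq_nil (by omega),
    show PySem.List.pyRange 1 (n+1) 1 = [] from PySem.List.pyRange_one_eq_nil (by omega),
    List.foldl_nil, List.foldl_nil]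
  have hnt : n.toNat = 0 := by omega
  simp only [hnt]
  simp [pvAltF]
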